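-- pv_equiv track=rewrite | github.com/ozanozisik/orsum | termCombinationLib.py | initializeTermSummary
-- ===== SOURCE A (Python) =====
-- def initializeTermSummary(tbsGsIDsList):
-- 	'''
-- 	This function initializes the term summary.
-- 	All terms represent themselves.
-- 	Term summaries are stored in a list.
-- 	Each member contains representing term ID, list of represented terms,
-- 	rank (currently rank of the best term)
-- 	rank starts from 1
-- 	'''
-- 	termSummary=[]
-- 	for tbsGsIDsNo in range(len(tbsGsIDsList)):
-- 		tbsGsIDs=tbsGsIDsList[tbsGsIDsNo]
-- 		for idNo in range(len(tbsGsIDs)):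
-- 			gsID=tbsGsIDs[idNo]
-- 			rank=idNo+1
-- 			termSummary.append([gsID, [gsID], rank])
-- 	termSummary.sort(key=lambda x: x[2])#Ascending sort based on rank/score
-- 	return termSummary
-- ===== SOURCE B (Python) =====
-- def initializeTermSummary(tbsGsIDsList):
-- 	maxlen = 0
-- 	for tbsGsIDs in tbsGsIDsList:
-- 		maxlen = max(maxlen, len(tbsGsIDs))
-- 	buckets = [[] for _ in range(maxlen)]
-- 	for tbsGsIDs in tbsGsIDsList:
-- 		idNo = 0
-- 		for gsID in tbsGsIDs:
-- 			buckets[idNo].append([gsID, [gsID], idNo + 1])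
-- 			idNo += 1
-- 	termSummary = []
-- 	for bucket in buckets:
-- 		termSummary += bucket
-- 	return termSummary
-- ===== Notes on version B (the rewrite author's own statement) =====
-- stated objective: alternative
-- what changed: Replaces the build-then-stable-sort (sort keyed by rank) with a single-pass bucket/counting placement: entries are appended to a per-rank bucket (preallocated from the max row length) and the buckets are concatenated, so no comparison sort is performed and stability within a rank comes from the original row order.
import Mathlib
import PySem

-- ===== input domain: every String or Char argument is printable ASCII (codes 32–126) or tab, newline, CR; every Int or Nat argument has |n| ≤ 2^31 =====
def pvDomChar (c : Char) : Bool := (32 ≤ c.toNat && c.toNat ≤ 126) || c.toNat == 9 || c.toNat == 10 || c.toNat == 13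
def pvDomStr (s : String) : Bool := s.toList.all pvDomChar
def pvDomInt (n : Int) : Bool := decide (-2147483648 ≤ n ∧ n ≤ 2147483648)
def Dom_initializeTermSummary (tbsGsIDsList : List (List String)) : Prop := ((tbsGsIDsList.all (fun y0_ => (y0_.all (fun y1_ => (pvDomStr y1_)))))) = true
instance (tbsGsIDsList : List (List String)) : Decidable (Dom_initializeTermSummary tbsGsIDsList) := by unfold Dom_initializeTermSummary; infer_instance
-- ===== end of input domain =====

-- B replaces A's build-then-stable-sort (sort keyed by rank) by a single-pass bucket
-- placement per rank followed by concatenation of the buckets ("alternative" objective).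


-- ===== PORT A =====
def initializeTermSummary (tbsGsIDsList : List (List String)) : List (String × List String × Int) :=
  let termSummary : List (String × List String × Int) :=
    (PySem.List.pyRange 0 (PySem.List.len tbsGsIDsList)).foldl (fun acc tbsGsIDsNo =>
      let tbsGsIDs := PySem.List.pyGetD tbsGsIDsList tbsGsIDsNo []
      (PySem.List.pyRange 0 (PySem.List.len tbsGsIDs)).foldl (fun acc2 idNo =>
        let gsID := PySem.List.pyGetD tbsGsIDs idNo ""
        let rank := idNo + 1
        acc2 ++ [(gsID, [gsID], rank)]) acc) []
  PySem.List.sorted termSummary (fun x => x.2.2)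

-- ===== PORT B =====
def initializeTermSummary_alt (tbsGsIDsList : List (List String)) : List (String × List String × Int) :=
  let maxlen : Nat := tbsGsIDsList.foldl (fun acc tbsGsIDs => max acc tbsGsIDs.length) 0
  let buckets : List (List (String × List String × Int)) := List.replicate maxlen []
  let buckets := tbsGsIDsList.foldl (fun bs tbsGsIDs =>
      (tbsGsIDs.foldl (fun (st : List (List (String × List String × Int)) × Nat) gsID =>
        (st.1.modify st.2 (· ++ [(gsID, [gsID], (st.2 : Int) + 1)]), st.2 + 1)) (bs, 0)).1) buckets
  buckets.foldl (fun termSummary bucket => termSummary ++ bucket) []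

-- ===== PRECONDITION & SPEC =====
def Spec_initializeTermSummary (tbsGsIDsList : List (List String)) (out : List (String × List String × Int)) : Prop := out = initializeTermSummary_alt tbsGsIDsList
instance (tbsGsIDsList : List (List String)) (out : List (String × List String × Int)) : Decidable (Spec_initializeTermSummary tbsGsIDsList out) := by unfold Spec_initializeTermSummary; infer_instance

-- ===== CLAIM (what is proved, stated in full; the proofs are below) =====
def Claim_equal_initializeTermSummary : Prop := ∀ (tbsGsIDsList : List (List String)), Dom_initializeTermSummary tbsGsIDsList → Spec_initializeTermSummary tbsGsIDsList (initializeTermSummary tbsGsIDsList)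

-- ===== LEMMAS AND PROOFS =====

def pvEnt (S : List String) (i : Nat) : String × List String × Int :=
  (S.getD i "", [S.getD i ""], (i : Int) + 1)

def pvCol (R : List (List String)) (pos : Nat) : List (String × List String × Int) :=
  R.filterMap (fun row => if pos < row.length then some (pvEnt row pos) else none)

def pvCols (R : List (List String)) (m : Nat) : List (String × List String × Int) :=
  (List.range m).flatMap (pvCol R)

def pvBef : (String × List String × Int) → (String × List String × Int) → Bool :=
  fun a b => decide (a.2.2 < b.2.2)

-- generic insertBy facts
theorem pv_insertBy_append_left {α : Type} (before : α → α → Bool) (x : α) (P S : List α)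
    (h : ∀ y ∈ P, before x y = false) :
    PySem.List.insertBy before x (P ++ S) = P ++ PySem.List.insertBy before x S := by
  induction P with
  | nil => rfl
  | cons y P ih =>
      simp only [List.cons_append, PySem.List.insertBy, h y (List.mem_cons_self),
        Bool.false_eq_true, if_false]
      exact congrArg (y :: ·) (ih (fun z hz => h z (List.mem_cons_of_mem _ hz)))

theorem pv_insertBy_cons_all {α : Type} (before : α → α → Bool) (x : α) (S : List α)
    (h : ∀ y ∈ S, before x y = true) :
    PySem.List.insertBy before x S = x :: S := by
  cases S with
  | nil => rfl
  | cons y t => simp [PySem.List.insertBy, h y (List.mem_cons_self)]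

-- rank of a column member
theorem pv_rank_mem_col {y : String × List String × Int} {R : List (List String)} {pos : Nat}
    (h : y ∈ pvCol R pos) : y.2.2 = (pos : Int) + 1 := by
  simp only [pvCol, List.mem_filterMap] at h
  obtain ⟨row, _, h⟩ := h
  split at h
  · cases h; rfl
  · cases h


theorem pv_col_single (T : List String) (pos : Nat) :
    pvCol [T] pos = if pos < T.length then [pvEnt T pos] else [] := by
  simp only [pvCol]
  by_cases h : pos < T.length <;> simp [List.filterMap, h]

theorem pv_col_append (P : List (List String)) (T : List String) (pos : Nat) :
    pvCol (P ++ [T]) pos = pvCol P pos ++ pvCol [T] pos := by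
  simp [pvCol, List.filterMap_append]

theorem pv_col_nil_append (P : List (List String)) :
    pvCol (P ++ [([] : List String)]) = pvCol P := by
  funext pos
  simp [pv_col_append, pv_col_single]

theorem pv_ent_take (S : List String) {k pos : Nat} (h : pos < k) :
    pvEnt (S.take k) pos = pvEnt S pos := by
  simp [pvEnt, List.getD, h]

theorem pv_col_take_succ (P : List (List String)) (S : List String) {j : Nat}
    (hj : j < S.length) (pos : Nat) :
    pvCol (P ++ [S.take (j+1)]) pos =
      if pos = j then pvCol (P ++ [S.take j]) pos ++ [pvEnt S j]
      else pvCol (P ++ [S.take j]) pos := by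
  have h1 : (S.take (j+1)).length = j+1 := by simp; omega
  have h2 : (S.take j).length = j := by simp; omega
  rw [pv_col_append, pv_col_append, pv_col_single, pv_col_single, h1, h2]
  by_cases hpj : pos = j
  · subst hpj
    rw [if_pos (Nat.lt_succ_self pos), if_neg (lt_irrefl pos), pv_ent_take S (Nat.lt_succ_self pos)]
    simp
  · rw [if_neg hpj]
    by_cases hlt : pos < j
    · rw [if_pos (Nat.lt_succ_of_lt hlt), if_pos hlt, pv_ent_take S (Nat.lt_succ_of_lt hlt),
        pv_ent_take S hlt]
    · rw [if_neg (show ¬ pos < j+1 by omega), if_neg hlt]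

theorem pv_flatMap_congr {α β : Type} {l : List α} {f g : α → List β}
    (h : ∀ x ∈ l, f x = g x) : l.flatMap f = l.flatMap g := by
  induction l with
  | nil => rfl
  | cons a l ih =>
      simp only [List.flatMap_cons, h a (List.mem_cons_self),
        ih (fun x hx => h x (List.mem_cons_of_mem _ hx))]

theorem pv_ins_step (P : List (List String)) (S : List String) {j m : Nat}
    (hj : j < S.length) (hm : S.length ≤ m) :
    PySem.List.insertBy pvBef (pvEnt S j) (pvCols (P ++ [S.take j]) m) =
      pvCols (P ++ [S.take (j+1)]) m := by
  have hsplit : m = (j+1) + (m - (j+1)) := by omega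
  unfold pvCols
  rw [hsplit, List.range_add, List.flatMap_append, List.flatMap_append]
  have hrank1 : ∀ y ∈ (List.range (j+1)).flatMap (pvCol (P ++ [S.take j])),
      pvBef (pvEnt S j) y = false := by
    intro y hy
    rw [List.mem_flatMap] at hy; obtain ⟨p, hp, hy⟩ := hy
    rw [List.mem_range] at hp
    have hr := pv_rank_mem_col hy
    simp only [pvBef, pvEnt, hr, decide_eq_false_iff_not, not_lt]
    omega
  have hrank2 : ∀ y ∈ ((List.range (m-(j+1))).map (fun x => (j+1) + x)).flatMap
      (pvCol (P ++ [S.take j])), pvBef (pvEnt S j) y = true := by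
    intro y hy
    rw [List.mem_flatMap] at hy; obtain ⟨p, hp, hy⟩ := hy
    rw [List.mem_map] at hp; obtain ⟨x, _, hx⟩ := hp
    have hr := pv_rank_mem_col hy
    simp only [pvBef, pvEnt, hr, decide_eq_true_eq]
    omega
  rw [pv_insertBy_append_left pvBef _ _ _ hrank1, pv_insertBy_cons_all pvBef _ _ hrank2]
  have hF2 : ((List.range (m-(j+1))).map (fun x => (j+1) + x)).flatMap
        (pvCol (P ++ [S.take (j+1)])) =
      ((List.range (m-(j+1))).map (fun x => (j+1) + x)).flatMap (pvCol (P ++ [S.take j])) := by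
    apply pv_flatMap_congr
    intro p hp
    rw [List.mem_map] at hp; obtain ⟨x, _, hx⟩ := hp
    rw [pv_col_take_succ P S hj p, if_neg (by omega)]
  have hF1 : (List.range (j+1)).flatMap (pvCol (P ++ [S.take (j+1)])) =
      (List.range (j+1)).flatMap (pvCol (P ++ [S.take j])) ++ [pvEnt S j] := by
    rw [List.range_succ, List.flatMap_append, List.flatMap_append]
    rw [pv_flatMap_congr (l := List.range j)
        (f := pvCol (P ++ [S.take (j+1)])) (g := pvCol (P ++ [S.take j]))
        (fun p hp => by rw [List.mem_range] at hp; rw [pv_col_take_succ P S hj p, if_neg (by omega)])]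
    rw [List.flatMap_cons, List.flatMap_nil, List.flatMap_cons, List.flatMap_nil]
    rw [pv_col_take_succ P S hj j, if_pos rfl]
    simp
  rw [hF1, hF2]
  simp

theorem pv_cols_nil (m : Nat) : pvCols [] m = [] := by simp [pvCols, pvCol]

theorem pv_cols_nil_append (P : List (List String)) (m : Nat) :
    pvCols (P ++ [([] : List String)]) m = pvCols P m := by
  simp [pvCols, pv_col_nil_append]

def pvRowE (S : List String) : List (String × List String × Int) :=
  (List.range S.length).map (pvEnt S)

theorem pv_fold_row (P : List (List String)) (S : List String) {m : Nat} (hS : S.length ≤ m) :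
    (pvRowE S).foldl (fun acc x => PySem.List.insertBy pvBef x acc) (pvCols P m) =
      pvCols (P ++ [S]) m := by
  suffices aux : ∀ j, j ≤ S.length →
      ((List.range j).map (pvEnt S)).foldl (fun acc x => PySem.List.insertBy pvBef x acc)
        (pvCols P m) = pvCols (P ++ [S.take j]) m by
    have h := aux S.length le_rfl
    rwa [List.take_length] at h
  intro j hj
  induction j with
  | zero => simp [pv_cols_nil_append]
  | succ j ih =>
      rw [List.range_succ, List.map_append, List.foldl_append, ih (by omega)]
      simp only [List.map_cons, List.map_nil, List.foldl_cons, List.foldl_nil]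
      exact pv_ins_step P S (by omega) hS

theorem pv_fold_rows {m : Nat} : ∀ (R P : List (List String)), (∀ row ∈ R, row.length ≤ m) →
    (R.flatMap pvRowE).foldl (fun acc x => PySem.List.insertBy pvBef x acc) (pvCols P m) =
      pvCols (P ++ R) m := by
  intro R
  induction R with
  | nil => intro P _; simp
  | cons S R ih =>
      intro P h
      rw [List.flatMap_cons, List.foldl_append,
        pv_fold_row P S (h S (List.mem_cons_self)),
        ih (P ++ [S]) (fun row hr => h row (List.mem_cons_of_mem _ hr))]
      simp

theorem pv_innerA (row : List String) (acc : List (String × List String × Int)) :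
    (PySem.List.pyRange 0 (PySem.List.len row)).foldl (fun acc2 idNo =>
        acc2 ++ [(PySem.List.pyGetD row idNo "", [PySem.List.pyGetD row idNo ""], idNo + 1)]) acc =
      acc ++ pvRowE row := by
  simp only [PySem.List.len]
  rw [PySem.List.pyRange_zero_natCast, List.foldl_map]
  simp only [PySem.List.pyGetD_natCast]
  exact PySem.List.foldl_append_singleton_eq_map (fun k => pvEnt row k) (List.range row.length) acc


theorem pv_A_eq_cols (R : List (List String)) (m : Nat) (hm : ∀ row ∈ R, row.length ≤ m) :
    initializeTermSummary R = pvCols R m := by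
  unfold initializeTermSummary
  rw [PySem.List.foldl_pyRange_pyGetD R ([] : List String)
      (f := fun acc row => (PySem.List.pyRange 0 (PySem.List.len row)).foldl (fun acc2 idNo =>
        acc2 ++ [(PySem.List.pyGetD row idNo "", [PySem.List.pyGetD row idNo ""], idNo + 1)]) acc)
      (init := ([] : List (String × List String × Int))) (by norm_num)]
  simp only [Int.toNat_zero, List.drop_zero, pv_innerA]
  rw [PySem.List.foldl_append_eq_flatMap pvRowE R []]
  rw [PySem.List.sorted_eq_foldl_insertBy]
  have h := pv_fold_rows (m := m) R [] hm
  rw [pv_cols_nil] at h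
  simpa using h

theorem pv_bucket_step (P : List (List String)) (S : List String) {j m : Nat}
    (hj : j < S.length) (_hm : S.length ≤ m) :
    ((List.range m).map (pvCol (P ++ [S.take j]))).modify j (· ++ [pvEnt S j]) =
      (List.range m).map (pvCol (P ++ [S.take (j+1)])) := by
  apply List.ext_getElem
  · simp
  intro p h1 h2
  rw [List.getElem_modify]
  simp only [List.getElem_map, List.getElem_range]
  rw [pv_col_take_succ P S hj p]
  by_cases hpj : p = j
  · rw [if_pos hpj.symm, if_pos hpj]
  · rw [if_neg (fun h => hpj h.symm), if_neg hpj]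

theorem pv_B_inner (S : List String) {m : Nat} (hm : S.length ≤ m) (P : List (List String)) :
    ∀ (T : List String) (j : Nat), S.drop j = T → j ≤ S.length →
      T.foldl (fun (st : List (List (String × List String × Int)) × Nat) gsID =>
          (st.1.modify st.2 (· ++ [(gsID, [gsID], (st.2 : Int) + 1)]), st.2 + 1))
        ((List.range m).map (pvCol (P ++ [S.take j])), j) =
      ((List.range m).map (pvCol (P ++ [S])), S.length) := by
  intro T
  induction T with
  | nil =>
      intro j hdrop hj
      have hlen : j = S.length := by
        have := congrArg List.length hdrop
        simp at this; omega
      subst hlen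
      rw [List.take_length]
      simp
  | cons g T ih =>
      intro j hdrop hj
      have hjlt : j < S.length := by
        have := congrArg List.length hdrop
        simp at this; omega
      have hcons := List.drop_eq_getElem_cons hjlt
      rw [hcons] at hdrop
      have hg : S[j] = g := (List.cons.injEq _ _ _ _ ▸ hdrop).1
      have hT : S.drop (j+1) = T := (List.cons.injEq _ _ _ _ ▸ hdrop).2
      simp only [List.foldl_cons]
      have hent : (g, [g], ((j : Nat) : Int) + 1) = pvEnt S j := by
        simp [pvEnt, List.getD, hjlt, hg]
      rw [show (((List.range m).map (pvCol (P ++ [S.take j])), j).1.modify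
            (((List.range m).map (pvCol (P ++ [S.take j])), j)).2
            (· ++ [(g, [g], ((((List.range m).map (pvCol (P ++ [S.take j])), j)).2 : Int) + 1)]),
            (((List.range m).map (pvCol (P ++ [S.take j])), j)).2 + 1) =
          ((List.range m).map (pvCol (P ++ [S.take (j+1)])), j + 1) from by
        simp only []
        rw [hent, pv_bucket_step P S hjlt hm]]
      exact ih (j+1) hT hjlt

theorem pv_B_rows {m : Nat} : ∀ (R P : List (List String)), (∀ row ∈ R, row.length ≤ m) →
    R.foldl (fun bs tbsGsIDs =>
        (tbsGsIDs.foldl (fun (st : List (List (String × List String × Int)) × Nat) gsID =>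
          (st.1.modify st.2 (· ++ [(gsID, [gsID], (st.2 : Int) + 1)]), st.2 + 1)) (bs, 0)).1)
      ((List.range m).map (pvCol P)) = (List.range m).map (pvCol (P ++ R)) := by
  intro R
  induction R with
  | nil => intro P _; simp
  | cons S R ih =>
      intro P h
      rw [List.foldl_cons]
      have h0 : (List.range m).map (pvCol P) = (List.range m).map (pvCol (P ++ [S.take 0])) := by
        rw [List.take_zero, pv_col_nil_append]
      rw [h0, pv_B_inner S (h S List.mem_cons_self) P S 0 List.drop_zero (Nat.zero_le _)]
      have := ih (P ++ [S]) (fun row hr => h row (List.mem_cons_of_mem _ hr))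
      simpa using this

theorem pv_B_eq_cols (R : List (List String)) :
    initializeTermSummary_alt R = pvCols R (R.foldl (fun acc s => max acc s.length) 0) := by
  have hm := (PySem.List.le_foldl_max_nat R (fun s => s.length) 0).2
  simp only [initializeTermSummary_alt]
  have hrep : List.replicate (R.foldl (fun acc s => max acc s.length) 0)
        ([] : List (String × List String × Int)) =
      (List.range (R.foldl (fun acc s => max acc s.length) 0)).map
        (pvCol ([] : List (List String))) := by
    have hc : pvCol ([] : List (List String)) = fun _ => [] := funext fun pos => by simp [pvCol]
    rw [hc]
    simp
  rw [hrep, pv_B_rows R [] hm, PySem.List.foldl_append_eq_flatten]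
  simp [pvCols, List.flatMap_def]

theorem pv_final (R : List (List String)) : initializeTermSummary R = initializeTermSummary_alt R := by
  have hm := (PySem.List.le_foldl_max_nat R (fun s => s.length) 0).2
  rw [pv_A_eq_cols R _ hm, pv_B_eq_cols R]

-- ===== VERDICT (by name: the statement is the Claim_ definition above) =====
theorem initializeTermSummary_spec : Claim_equal_initializeTermSummary := by
  intro R _
  unfold Spec_initializeTermSummary
  exact pv_final R
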